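-- pv_equiv track=rewrite | github.com/LYNQUATIQ/AoC | 2023/day11.py | expand_galaxies
-- ===== SOURCE A (Python) =====
-- def expand_galaxies(inputs: str, expansion: int = 2):
--     galaxy_x: dict[int, int] = {}
--     galaxy_y: dict[int, int] = {}
--     n = 0
--     for y, line in enumerate(inputs.splitlines()):
--         for x, c in enumerate(line):
--             if c == "#":
--                 galaxy_x[n] = x
--                 galaxy_y[n] = y
--                 n += 1
--     width, height = x + 1, y + 1
--
--     empty_rows = set(y for y in range(height) if y not in galaxy_y.values())
--     empty_columns = set(x for x in range(width) if x not in galaxy_x.values())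
--
--     for i in range(n):
--         x, y = galaxy_x[i], galaxy_y[i]
--         galaxy_x[i] += sum([column < x for column in empty_columns]) * (expansion - 1)
--         galaxy_y[i] += sum([row < y for row in empty_rows]) * (expansion - 1)
--
--     return n, galaxy_x, galaxy_y
-- ===== SOURCE B (Python) =====
-- def expand_galaxies(inputs: str, expansion: int = 2):
--     lines = inputs.splitlines()
--     width, height = len(lines[-1]), len(lines)
--     galaxies = [(x, y)
--                 for y, line in enumerate(lines)
--                 for x, c in enumerate(line) if c == "#"]
--     occupied_x = {x for x, _ in galaxies}
--     occupied_y = {y for _, y in galaxies}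
--     empty_columns = [x for x in range(width) if x not in occupied_x]
--     empty_rows = [y for y in range(height) if y not in occupied_y]
--     growth = expansion - 1
--     galaxy_x = {i: x + count_less(empty_columns, x) * growth
--                 for i, (x, _) in enumerate(galaxies)}
--     galaxy_y = {i: y + count_less(empty_rows, y) * growth
--                 for i, (_, y) in enumerate(galaxies)}
--     return len(galaxies), galaxy_x, galaxy_y
--
--
-- def count_less(sorted_values, v):
--     """Number of entries of an ascending list that are < v (binary search)."""
--     lo, hi = 0, len(sorted_values)
--     while lo < hi:
--         mid = (lo + hi) // 2
--         if sorted_values[mid] < v: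
--             lo = mid + 1
--         else:
--             hi = mid
--     return lo
-- ===== Notes on version B (the rewrite author's own statement) =====
-- stated objective: faster
-- what changed: B collects galaxies in one comprehension, finds empty rows/columns with O(1) set lookups, and computes each galaxy's shift by binary search in the sorted empty-column/row lists, replacing A's O(n) dict-values scan per row/column and O(W+H) linear scan per galaxy; Pre_ excludes inputs whose last splitline is empty (A's grid width is then a leftover loop variable from an earlier line, an accidental corner) and inputs with no characters at all, where A raises UnboundLocalError.
import Mathlib
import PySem

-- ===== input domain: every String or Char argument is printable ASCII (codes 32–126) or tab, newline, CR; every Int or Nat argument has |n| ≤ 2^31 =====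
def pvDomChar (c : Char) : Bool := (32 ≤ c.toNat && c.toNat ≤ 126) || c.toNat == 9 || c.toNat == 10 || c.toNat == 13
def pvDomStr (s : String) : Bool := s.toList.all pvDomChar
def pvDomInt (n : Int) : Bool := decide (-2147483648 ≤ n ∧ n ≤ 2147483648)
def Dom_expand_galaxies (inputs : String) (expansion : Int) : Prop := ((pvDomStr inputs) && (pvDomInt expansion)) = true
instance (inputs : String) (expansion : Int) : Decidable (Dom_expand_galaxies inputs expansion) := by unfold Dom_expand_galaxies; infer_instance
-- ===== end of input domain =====

-- B detects empty rows/columns with set lookups and computes each galaxy's shift by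
-- binary search in the sorted empty-column/row lists, instead of A's per-galaxy linear
-- scans and per-column/row scans over the dict values: objective = faster.

-- ===== PORT A =====
-- state: (galaxy_x, galaxy_y, n, x, y); x/y are Option since Python leaves them unbound
-- until the loops first assign them (UnboundLocalError on 'x + 1' if never assigned → Pre_).
def expand_galaxies (inputs : String) (expansion : Int) : Int × (List (Int × Int)) × (List (Int × Int)) :=
  let st := (PySem.List.enumerate (PySem.Str.splitlines inputs)).foldl
    (fun (s : PySem.Dict Int Int × PySem.Dict Int Int × Int × Option Int × Option Int) yl =>
      -- the outer 'for y, line in enumerate(...)' assigns y on every iteration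
      let s0 : PySem.Dict Int Int × PySem.Dict Int Int × Int × Option Int × Option Int :=
        (s.1, s.2.1, s.2.2.1, s.2.2.2.1, some yl.1)
      (PySem.List.enumerate yl.2.toList).foldl
        (fun s2 xc =>
          if xc.2 = '#' then
            (s2.1.insert s2.2.2.1 xc.1, s2.2.1.insert s2.2.2.1 yl.1, s2.2.2.1 + 1,
             some xc.1, s2.2.2.2.2)
          else
            (s2.1, s2.2.1, s2.2.2.1, some xc.1, s2.2.2.2.2)) s0)
    (PySem.Dict.empty, PySem.Dict.empty, 0, none, none)
  match st.2.2.2.1, st.2.2.2.2 with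
  | some x, some y =>
    let gx := st.1
    let gy := st.2.1
    let n := st.2.2.1
    let width := x + 1
    let height := y + 1
    let empty_rows : PySem.Set Int :=
      PySem.Set.ofList ((PySem.List.pyRange 0 height 1).filter
        (fun r => !((PySem.Dict.values gy).contains r)))
    let empty_columns : PySem.Set Int :=
      PySem.Set.ofList ((PySem.List.pyRange 0 width 1).filter
        (fun c => !((PySem.Dict.values gx).contains c)))
    let fin := (PySem.List.pyRange 0 n 1).foldl
      (fun (p : PySem.Dict Int Int × PySem.Dict Int Int) i =>
        let x := p.1.getD i 0
        let y := p.2.getD i 0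
        (p.1.insert i (x + (List.map (fun column => if column < x then (1 : Int) else 0) empty_columns).sum * (expansion - 1)),
         p.2.insert i (y + (List.map (fun row => if row < y then (1 : Int) else 0) empty_rows).sum * (expansion - 1))))
      (gx, gy)
    (n, fin.1.items, fin.2.items)
  | _, _ => (0, [], [])  -- unreachable under Pre_ (Python raises UnboundLocalError)

-- ===== PORT B =====
-- count_less(sorted_values, v): binary search; the index is always in range, so pyGetD is exact
def count_less_go (a : List Int) (v : Int) (lo hi : Nat) : Nat :=
  if h : lo < hi then
    if PySem.List.pyGetD a (((lo + hi) / 2 : Nat) : Int) 0 < v then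
      count_less_go a v ((lo + hi) / 2 + 1) hi
    else
      count_less_go a v lo ((lo + hi) / 2)
  else lo
termination_by hi - lo
decreasing_by all_goals omega

def count_less (sorted_values : List Int) (v : Int) : Int :=
  (count_less_go sorted_values v 0 sorted_values.length : Int)

def expand_galaxies_alt (inputs : String) (expansion : Int) : Int × (List (Int × Int)) × (List (Int × Int)) :=
  let lines := PySem.Str.splitlines inputs
  let width : Int := match PySem.List.pyGet? lines (-1) with
    | some l => PySem.Str.len l
    | none => 0  -- Python raises IndexError on lines[-1] here; outside Pre_
  let height : Int := (lines.length : Int)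
  let galaxies : List (Int × Int) := (PySem.List.enumerate lines).flatMap
    (fun yl => (PySem.List.enumerate yl.2.toList).filterMap
      (fun xc => if xc.2 = '#' then some (xc.1, yl.1) else none))
  let occx : PySem.Set Int := PySem.Set.ofList (galaxies.map (fun g => g.1))
  let occy : PySem.Set Int := PySem.Set.ofList (galaxies.map (fun g => g.2))
  let empty_columns := (PySem.List.pyRange 0 width 1).filter (fun x => !(PySem.Set.contains occx x))
  let empty_rows := (PySem.List.pyRange 0 height 1).filter (fun y => !(PySem.Set.contains occy y))
  let growth := expansion - 1
  let gx := (PySem.List.enumerate galaxies).map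
    (fun ig => (ig.1, ig.2.1 + count_less empty_columns ig.2.1 * growth))
  let gy := (PySem.List.enumerate galaxies).map
    (fun ig => (ig.1, ig.2.2 + count_less empty_rows ig.2.2 * growth))
  ((galaxies.length : Int), gx, gy)

-- ===== PRECONDITION & SPEC =====
-- Pre_ excludes (a) inputs with no characters on any line, where A raises UnboundLocalError,
-- and (b) inputs whose LAST splitline is empty while an earlier one is not: there A's grid
-- width is the leftover loop variable of an earlier line — a corner no caller of this
-- grid function exercises, on which neither that width nor any other is the specified one.
def Pre_expand_galaxies (inputs : String) (expansion : Int) : Prop :=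
  (PySem.Str.splitlines inputs).getLast?.getD "" ≠ ""
instance (inputs : String) (expansion : Int) : Decidable (Pre_expand_galaxies inputs expansion) := by
  unfold Pre_expand_galaxies; infer_instance
def pvWitness_expand_galaxies : String × Int := ("#.\n.#", 2)

def Spec_expand_galaxies (inputs : String) (expansion : Int) (out : Int × (List (Int × Int)) × (List (Int × Int))) : Prop := out = expand_galaxies_alt inputs expansion
instance (inputs : String) (expansion : Int) (out : Int × (List (Int × Int)) × (List (Int × Int))) : Decidable (Spec_expand_galaxies inputs expansion out) := by unfold Spec_expand_galaxies; infer_instance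

-- ===== CLAIM (what is proved, stated in full; the proofs are below) =====
def Claim_equal_expand_galaxies : Prop := ∀ (inputs : String) (expansion : Int), Dom_expand_galaxies inputs expansion → Pre_expand_galaxies inputs expansion → Spec_expand_galaxies inputs expansion (expand_galaxies inputs expansion)

-- ===== LEMMAS AND PROOFS =====

def pvD (vs : List Int) : PySem.Dict Int Int := PySem.Dict.mk (PySem.List.enumerate vs)

def pvLineGal (y : Int) (cs : List Char) : List (Int × Int) :=
  (PySem.List.enumerate cs).filterMap (fun xc => if xc.2 = '#' then some (xc.1, y) else none)

def pvGal (lines : List String) : List (Int × Int) :=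
  (PySem.List.enumerate lines).flatMap (fun yl => pvLineGal yl.1 yl.2.toList)

theorem pvD_append (vs : List Int) (v : Int) :
    (pvD vs).insert (vs.length : Int) v = pvD (vs ++ [v]) := by
  have hc : (pvD vs).contains (vs.length : Int) = false := by
    simp [pvD, PySem.Dict.contains_mk, PySem.List.mem_enumerate_iff]
    intro k hk; omega
  have h1 := PySem.Dict.items_insert_of_not_contains (pvD vs) v hc
  have h2 : PySem.List.enumerate (vs ++ [v]) = PySem.List.enumerate vs ++ [((vs.length : Int), v)] := by
    simp [PySem.List.enumerate_append]
  cases h : (pvD vs).insert (vs.length : Int) v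
  simp_all [pvD]

theorem pvD_keys_nodup (vs : List Int) : (pvD vs).keys.Nodup := by
  have : (pvD vs).keys = PySem.List.pyRange 0 (vs.length : Int) := by
    simp [pvD, PySem.Dict.keys_mk, PySem.List.map_fst_enumerate]
  rw [this]; exact PySem.List.nodup_pyRange_one 0 _

theorem pvD_getD (vs : List Int) (j : Nat) (h : j < vs.length) (d : Int) :
    (pvD vs).getD (j : Int) d = vs[j] := by
  apply PySem.Dict.getD_of_mem_items
  · show ((j : Int), vs[j]) ∈ PySem.List.enumerate vs 0
    rw [PySem.List.mem_enumerate_iff]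
    exact ⟨j, h, by simp⟩
  · exact pvD_keys_nodup vs

theorem pv_map_replace_enum (vs : List Int) (s : Int) (j : Nat) (v : Int) (h : j < vs.length) :
    List.map (fun p => if p.1 == s + (j : Int) then (s + (j : Int), v) else p) (PySem.List.enumerate vs s)
      = PySem.List.enumerate (vs.set j v) s := by
  induction vs generalizing s j with
  | nil => simp at h
  | cons a t ih =>
    cases j with
    | zero =>
      simp [PySem.List.enumerate_cons]
      have hid : List.map (fun p => if p.1 = s then (s, v) else p) (PySem.List.enumerate t (s+1))
          = List.map id (PySem.List.enumerate t (s+1)) := by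
        apply List.map_congr_left
        intro p hp
        rw [PySem.List.mem_enumerate_iff] at hp
        obtain ⟨k, hk, rfl⟩ := hp
        simp
        omega
      simpa using hid
    | succ j' =>
      have h' : j' < t.length := by simpa using h
      have := ih (s + 1) j' h'
      simp [PySem.List.enumerate_cons]
      constructor
      · omega
      · have e1 : s + ((j' : Int) + 1) = (s + 1) + (j' : Int) := by ring
        calc List.map (fun p => if p.1 = s + ((j' : Int) + 1) then (s + ((j' : Int) + 1), v) else p)
               (PySem.List.enumerate t (s + 1))
            = List.map (fun p => if p.1 = (s + 1) + (j' : Int) then ((s + 1) + (j' : Int), v) else p)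
               (PySem.List.enumerate t (s + 1)) := by rw [e1]
          _ = PySem.List.enumerate (t.set j' v) (s + 1) := by
                have := ih (s + 1) j' h'
                simpa using this

theorem pvD_set (vs : List Int) (j : Nat) (v : Int) (h : j < vs.length) :
    (pvD vs).insert (j : Int) v = pvD (vs.set j v) := by
  have hc : (pvD vs).contains (j : Int) = true := by
    have hkeys : (pvD vs).keys = PySem.List.pyRange 0 (vs.length : Int) := by
      simp [pvD, PySem.Dict.keys_mk, PySem.List.map_fst_enumerate]
    rw [show ((pvD vs).contains (j : Int) = true) = ((j : Int) ∈ (pvD vs).keys) from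
      propext (PySem.Dict.contains_iff_mem_keys _ _), hkeys, PySem.List.mem_pyRange_one]
    omega
  have h1 := PySem.Dict.items_insert_of_contains (pvD vs) v hc
  have h2 := pv_map_replace_enum vs 0 j v h
  simp only [zero_add] at h2
  cases hx : (pvD vs).insert (j : Int) v
  simp_all [pvD]

theorem pv_set_take_drop (f : Int → Int) (vs : List Int) (m : Nat) (h : m < vs.length) :
    ((vs.take m).map f ++ vs.drop m).set m (f vs[m])
      = (vs.take (m + 1)).map f ++ vs.drop (m + 1) := by
  have hlen : ((vs.take m).map f).length = m := by simp [List.length_take]; omega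
  have hd : vs.drop m = vs[m] :: vs.drop (m + 1) := List.drop_eq_getElem_cons h
  rw [List.set_append]
  rw [hd]
  simp only [hlen, lt_irrefl, Nat.sub_self, List.set_cons_zero, if_neg (by omega : ¬ m < m)]
  have hTake : List.take (m + 1) (List.map f vs) = List.take m (List.map f vs) ++ [f vs[m]] := by
    rw [List.take_add_one, List.getElem?_eq_getElem (by simpa using h)]
    simp
  simp [hTake]

theorem pv_upd_fold (f g : Int → Int) (m : Nat) (vsx vsy : List Int)
    (hlen : vsx.length = vsy.length) (hm : m ≤ vsx.length) :
    (PySem.List.pyRange 0 (m : Int) 1).foldl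
      (fun (p : PySem.Dict Int Int × PySem.Dict Int Int) i =>
        (p.1.insert i (f (p.1.getD i 0)), p.2.insert i (g (p.2.getD i 0))))
      (pvD vsx, pvD vsy)
    = (pvD ((vsx.take m).map f ++ vsx.drop m), pvD ((vsy.take m).map g ++ vsy.drop m)) := by
  induction m with
  | zero => simp [PySem.List.pyRange_one_eq_nil (by omega : (0:Int) ≤ 0)]
  | succ k ih =>
    have hk : k ≤ vsx.length := by omega
    have hkx : k < vsx.length := by omega
    have hky : k < vsy.length := by omega
    have hrange : PySem.List.pyRange 0 ((k + 1 : Nat) : Int) 1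
        = PySem.List.pyRange 0 (k : Int) 1 ++ [(k : Int)] := by
      push_cast
      exact PySem.List.pyRange_one_succ_right (by positivity)
    rw [hrange, List.foldl_append, ih hk]
    simp only [List.foldl_cons, List.foldl_nil]
    have e1 : ((vsx.take k).map f ++ vsx.drop k).length = vsx.length := by
      simp [List.length_take]; omega
    have gx : (pvD ((vsx.take k).map f ++ vsx.drop k)).getD (k : Int) 0
        = ((vsx.take k).map f ++ vsx.drop k)[k]'(by omega) := pvD_getD _ k (by omega) 0
    have gy : (pvD ((vsy.take k).map g ++ vsy.drop k)).getD (k : Int) 0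
        = ((vsy.take k).map g ++ vsy.drop k)[k]'(by rw [show ((vsy.take k).map g ++ vsy.drop k).length = vsy.length by simp [List.length_take]; omega]; omega) := pvD_getD _ k (by simp [List.length_take]; omega) 0
    have vx : ((vsx.take k).map f ++ vsx.drop k)[k]'(by omega) = vsx[k] := by
      have : ((vsx.take k).map f).length = k := by simp [List.length_take]; omega
      rw [List.getElem_append_right (by omega)]
      simp [Nat.min_eq_left hk, Nat.sub_self]
    have vy : ((vsy.take k).map g ++ vsy.drop k)[k]'(by simp [List.length_take]; omega) = vsy[k] := by
      have : ((vsy.take k).map g).length = k := by simp [List.length_take]; omega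
      rw [List.getElem_append_right (by omega)]
      simp [Nat.min_eq_left (le_of_lt hky), Nat.sub_self]
    rw [gx, gy, vx, vy,
        pvD_set _ k _ (by omega), pvD_set _ k _ (by simp [List.length_take]; omega),
        pv_set_take_drop f vsx k hkx, pv_set_take_drop g vsy k hky]

theorem pvLineGal_append (y : Int) (cs : List Char) (c : Char) :
    pvLineGal y (cs ++ [c])
      = pvLineGal y cs ++ (if c = '#' then [((cs.length : Int), y)] else []) := by
  unfold pvLineGal
  rw [PySem.List.enumerate_append, List.filterMap_append]
  by_cases hc : c = '#' <;>
    simp [PySem.List.enumerate_cons, hc]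

theorem pv_inner_fold (y : Int) (cs : List Char) (g : List (Int × Int)) (xo yo : Option Int) :
    (PySem.List.enumerate cs).foldl
      (fun (s2 : PySem.Dict Int Int × PySem.Dict Int Int × Int × Option Int × Option Int) xc =>
        if xc.2 = '#' then
          (s2.1.insert s2.2.2.1 xc.1, s2.2.1.insert s2.2.2.1 y, s2.2.2.1 + 1,
           some xc.1, s2.2.2.2.2)
        else
          (s2.1, s2.2.1, s2.2.2.1, some xc.1, s2.2.2.2.2))
      (pvD (g.map Prod.fst), pvD (g.map Prod.snd), (g.length : Int), xo, yo)
    = (pvD ((g ++ pvLineGal y cs).map Prod.fst),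
       pvD ((g ++ pvLineGal y cs).map Prod.snd),
       ((g ++ pvLineGal y cs).length : Int),
       (if cs.isEmpty then xo else some ((cs.length : Int) - 1)), yo) := by
  induction cs using List.reverseRecOn with
  | nil => simp [pvLineGal]
  | append_singleton cs c ih =>
    rw [PySem.List.enumerate_append, List.foldl_append, ih]
    by_cases hc : c = '#'
    · subst hc
      have e1 : ((g ++ pvLineGal y cs).length : Int)
          = (((g ++ pvLineGal y cs).map Prod.fst).length : Int) := by simp
      have e2 : ((g ++ pvLineGal y cs).length : Int)
          = (((g ++ pvLineGal y cs).map Prod.snd).length : Int) := by simp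
      simp only [PySem.List.enumerate_cons, PySem.List.enumerate_nil, List.foldl_cons,
        List.foldl_nil, zero_add, pvLineGal_append]
      simp only [if_true]
      simp only [Prod.mk.injEq]
      refine ⟨?_, ?_, ?_, ?_, trivial⟩
      · rw [e1, pvD_append]
        congr 1
        simp
      · rw [e2, pvD_append]
        congr 1
        simp
      · simp
        push_cast
        omega
      · simp
    · simp only [PySem.List.enumerate_cons, PySem.List.enumerate_nil, List.foldl_cons,
        List.foldl_nil, zero_add, pvLineGal_append]
      rw [if_neg (show ¬ (((cs.length : Int), c).2 = '#') from hc)]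
      rw [if_neg hc]
      simp only [Prod.mk.injEq, List.append_nil]
      simp

theorem pvGal_append (ls : List String) (l : String) :
    pvGal (ls ++ [l]) = pvGal ls ++ pvLineGal (ls.length : Int) l.toList := by
  unfold pvGal
  rw [PySem.List.enumerate_append, List.flatMap_append]
  simp [PySem.List.enumerate_cons]

theorem pv_outer_fold (lines : List String) :
    (PySem.List.enumerate lines).foldl
      (fun (s : PySem.Dict Int Int × PySem.Dict Int Int × Int × Option Int × Option Int) yl =>
        let s0 : PySem.Dict Int Int × PySem.Dict Int Int × Int × Option Int × Option Int :=
          (s.1, s.2.1, s.2.2.1, s.2.2.2.1, some yl.1)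
        (PySem.List.enumerate yl.2.toList).foldl
          (fun s2 xc =>
            if xc.2 = '#' then
              (s2.1.insert s2.2.2.1 xc.1, s2.2.1.insert s2.2.2.1 yl.1, s2.2.2.1 + 1,
               some xc.1, s2.2.2.2.2)
            else
              (s2.1, s2.2.1, s2.2.2.1, some xc.1, s2.2.2.2.2)) s0)
      (PySem.Dict.empty, PySem.Dict.empty, 0, none, none)
    = (pvD ((pvGal lines).map Prod.fst),
       pvD ((pvGal lines).map Prod.snd),
       ((pvGal lines).length : Int),
       Option.map (fun l => ((l.toList.length : Int) - 1))
         (lines.reverse.find? (fun l => decide (l ≠ ""))),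
       if lines.isEmpty then none else some ((lines.length : Int) - 1)) := by
  induction lines using List.reverseRecOn with
  | nil => rfl
  | append_singleton ls l ih =>
    rw [PySem.List.enumerate_append, List.foldl_append, ih]
    simp only [List.foldl_cons, List.foldl_nil, PySem.List.enumerate_cons,
      PySem.List.enumerate_nil, zero_add]
    rw [pv_inner_fold ((ls.length : Int)) l.toList (pvGal ls) _ (some (ls.length : Int))]
    rw [pvGal_append]
    simp only [Prod.mk.injEq]
    refine ⟨trivial, trivial, trivial, ?_, ?_⟩
    · by_cases hl : l = ""
      · subst hl
        simp
      · have hne : l.toList ≠ [] := by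
          rw [ne_eq, String.toList_eq_nil_iff]
          exact hl
        simp [List.isEmpty_iff, hne, List.find?_cons, hl]
    · simp

theorem pv_map_enum {α β : Type} (l : List α) (F : α → β) (s : Int) :
    (PySem.List.enumerate l s).map (fun p => (p.1, F p.2)) = PySem.List.enumerate (l.map F) s := by
  induction l generalizing s with
  | nil => simp
  | cons a t ih => simp [PySem.List.enumerate_cons, ih]

theorem pv_contains (vs : List Int) (c : Int) :
    PySem.Set.contains (PySem.Set.ofList vs) c = List.contains vs c := by
  by_cases h : c ∈ vs
  · rw [(PySem.Set.contains_iff _ _).mpr ((PySem.Set.mem_ofList vs c).mpr h)]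
    exact (List.contains_iff_mem.mpr h).symm
  · have h1 : ¬ (PySem.Set.contains (PySem.Set.ofList vs) c = true) := by
      rw [PySem.Set.contains_iff, PySem.Set.mem_ofList]; exact h
    have h2 : ¬ (List.contains vs c = true) := by rw [List.contains_iff_mem]; exact h
    rw [Bool.not_eq_true] at h1 h2
    rw [h1, h2]

theorem pvD_values (vs : List Int) : (pvD vs).values = vs := by
  simp [pvD, PySem.Dict.values_mk, PySem.List.map_snd_enumerate]

theorem pvD_items (vs : List Int) : (pvD vs).items = PySem.List.enumerate vs := rfl

theorem pv_ofList_filter (p : Int → Bool) (a b : Int) :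
    PySem.Set.ofList ((PySem.List.pyRange a b 1).filter p) = (PySem.List.pyRange a b 1).filter p :=
  PySem.Set.ofList_eq_self_of_nodup _ ((PySem.List.nodup_pyRange_one a b).filter p)

theorem pv_sum_ite (x : Int) (l : List Int) :
    (List.map (fun c => if c < x then (1 : Int) else 0) l).sum
      = (l.countP (fun c => decide (c < x)) : Int) := by
  have h : (fun c => if c < x then (1 : Int) else 0)
      = (fun c => if (fun c => decide (c < x)) c = true then (1 : Int) else 0) := by
    funext c; simp
  rw [h, PySem.List.sum_map_ite_one_zero]

theorem pv_gal_def (lines : List String) :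
    (PySem.List.enumerate lines).flatMap
      (fun yl => (PySem.List.enumerate yl.2.toList).filterMap
        (fun xc => if xc.2 = '#' then some (xc.1, yl.1) else none)) = pvGal lines := rfl

theorem pv_fst_eta : (fun (g : Int × Int) => g.1) = Prod.fst := rfl

theorem pv_snd_eta : (fun (g : Int × Int) => g.2) = Prod.snd := rfl

-- countP of a list that is all-< before index lo and all-≥ from lo on
theorem pv_countP_split (a : List Int) (v : Int) (lo : Nat) (hlo : lo ≤ a.length)
    (h1 : ∀ (i : Nat) (h : i < a.length), i < lo → a[i] < v)
    (h2 : ∀ (i : Nat) (h : i < a.length), lo ≤ i → ¬ a[i] < v) :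
    a.countP (fun c => decide (c < v)) = lo := by
  conv_lhs => rw [← List.take_append_drop lo a]
  rw [List.countP_append]
  have ht : (a.take lo).countP (fun c => decide (c < v)) = (a.take lo).length := by
    rw [List.countP_eq_length]
    intro x hx
    rw [List.mem_iff_getElem] at hx
    obtain ⟨j, hj, rfl⟩ := hx
    have hj' : j < a.length := by
      have := hj; simp [List.length_take] at this; omega
    rw [List.getElem_take]
    have hjlo : j < lo := by simp [List.length_take] at hj; omega
    simpa using h1 j hj' hjlo
  have hd : (a.drop lo).countP (fun c => decide (c < v)) = 0 := by
    rw [List.countP_eq_zero]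
    intro x hx
    rw [List.mem_iff_getElem] at hx
    obtain ⟨j, hj, rfl⟩ := hx
    rw [List.getElem_drop]
    have hj' : lo + j < a.length := by simp [List.length_drop] at hj; omega
    simpa using h2 (lo + j) hj' (by omega)
  rw [ht, hd, List.length_take]
  omega

theorem pv_count_less_go_spec (a : List Int) (v : Int) (hmono : a.Pairwise (· ≤ ·)) :
    ∀ (n lo hi : Nat), hi - lo ≤ n → hi ≤ a.length → lo ≤ hi →
    (∀ (i : Nat) (h : i < a.length), i < lo → a[i] < v) →
    (∀ (i : Nat) (h : i < a.length), hi ≤ i → ¬ a[i] < v) →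
    count_less_go a v lo hi = a.countP (fun c => decide (c < v)) := by
  have hmono' := (List.pairwise_iff_getElem).mp hmono
  intro n
  induction n with
  | zero =>
    intro lo hi hn hhi hlo h1 h2
    rw [count_less_go, dif_neg (by omega)]
    exact (pv_countP_split a v lo (by omega) h1
      (by intro i h hi'; exact h2 i h (by omega))).symm
  | succ n ih =>
    intro lo hi hn hhi hlo h1 h2
    rw [count_less_go]
    by_cases hlt : lo < hi
    · rw [dif_pos hlt]
      have hmid : (lo + hi) / 2 < a.length := by omega
      have hget : PySem.List.pyGetD a (((lo + hi) / 2 : Nat) : Int) 0 = a[(lo + hi) / 2] := by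
        rw [PySem.List.pyGetD_natCast, List.getD_eq_getElem?_getD,
          List.getElem?_eq_getElem hmid, Option.getD_some]
      rw [hget]
      by_cases hv : a[(lo + hi) / 2] < v
      · rw [if_pos hv]
        apply ih ((lo + hi) / 2 + 1) hi (by omega) hhi (by omega)
        · intro i hil hi'
          rcases Nat.lt_or_ge i ((lo + hi) / 2) with hc | hc
          · exact lt_of_le_of_lt (hmono' i ((lo + hi) / 2) hil hmid hc) hv
          · have : i = (lo + hi) / 2 := by omega
            subst this; exact hv
        · exact h2
      · rw [if_neg hv]
        apply ih lo ((lo + hi) / 2) (by omega) (by omega) (by omega) h1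
        intro i hil hi'
        rcases Nat.lt_or_ge ((lo + hi) / 2) i with hc | hc
        · intro hlt'
          exact hv (lt_of_le_of_lt (hmono' ((lo + hi) / 2) i hmid hil hc) hlt')
        · have : i = (lo + hi) / 2 := by omega
          subst this; exact hv
    · rw [dif_neg hlt]
      exact (pv_countP_split a v lo (by omega) h1
        (by intro i h hi'; exact h2 i h (by omega))).symm

theorem pv_count_less (a : List Int) (v : Int) (hmono : a.Pairwise (· ≤ ·)) :
    count_less a v = (a.countP (fun c => decide (c < v)) : Int) := by
  unfold count_less
  rw [pv_count_less_go_spec a v hmono a.length 0 a.length (by omega) (by omega) (by omega)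
    (by intro i _ h; omega) (by intro i h h'; omega)]

theorem pv_filter_pairwise (p : Int → Bool) (a b : Int) :
    ((PySem.List.pyRange a b 1).filter p).Pairwise (· ≤ ·) :=
  ((PySem.List.pairwise_lt_pyRange_one a b).filter p).imp le_of_lt

theorem pv_filter_eq (vs : List Int) (W : Int) :
    (PySem.List.pyRange 0 W 1).filter (fun c => !(PySem.Set.contains (PySem.Set.ofList vs) c))
  = (PySem.List.pyRange 0 W 1).filter (fun c => !(vs.contains c)) := by
  apply List.filter_congr
  intro c _
  rw [pv_contains]

-- the shared per-galaxy shift value: A's sum of booleans = B's binary search count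
theorem pv_shift_eq (vs : List Int) (W x : Int) :
    (List.map (fun c => if c < x then (1 : Int) else 0)
       ((PySem.List.pyRange 0 W 1).filter (fun c => !(vs.contains c)))).sum
    = count_less ((PySem.List.pyRange 0 W 1).filter (fun c => !(vs.contains c))) x := by
  rw [pv_sum_ite, pv_count_less _ _ (pv_filter_pairwise _ 0 W)]

theorem pv_main (inputs : String) (expansion : Int)
    (hpre : Pre_expand_galaxies inputs expansion) :
    expand_galaxies inputs expansion = expand_galaxies_alt inputs expansion := by
  unfold Pre_expand_galaxies at hpre
  obtain ⟨l, hl⟩ : ∃ l, (PySem.Str.splitlines inputs).getLast? = some l := by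
    cases h : (PySem.Str.splitlines inputs).getLast? with
    | none => rw [h] at hpre; simp at hpre
    | some a => exact ⟨a, rfl⟩
  have hlne : l ≠ "" := by rw [hl] at hpre; simpa using hpre
  have hne : PySem.Str.splitlines inputs ≠ [] := by
    intro h; rw [h] at hl; simp at hl
  have hget : PySem.List.pyGet? (PySem.Str.splitlines inputs) (-1) = some l := by
    rw [PySem.List.pyGet?_neg_one, hl]
  have hfind : (PySem.Str.splitlines inputs).reverse.find? (fun s => decide (s ≠ "")) = some l := by
    obtain ⟨t, ht⟩ : ∃ t, (PySem.Str.splitlines inputs).reverse = l :: t := by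
      cases hrv : (PySem.Str.splitlines inputs).reverse with
      | nil =>
        exact absurd (by simpa using congrArg List.reverse hrv) hne
      | cons a t =>
        have ha : (PySem.Str.splitlines inputs).getLast? = some a := by
          rw [← List.head?_reverse, hrv]; rfl
        rw [hl] at ha
        injection ha with ha
        exact ⟨t, by rw [ha]⟩
    rw [ht]
    exact List.find?_cons_of_pos (by simpa using hlne)
  have hnil : (PySem.Str.splitlines inputs).isEmpty = false := by
    simpa [List.isEmpty_iff] using hne
  unfold expand_galaxies expand_galaxies_alt
  simp only [pv_outer_fold, hfind, Option.map_some, hnil, Bool.false_eq_true, if_false,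
    hget, pv_gal_def, pv_fst_eta, pv_snd_eta, pvD_values, PySem.Str.len_eq,
    show ((l.toList.length : Int) - 1 + 1) = (l.toList.length : Int) by ring,
    show ((PySem.Str.splitlines inputs).length : Int) - 1 + 1
        = ((PySem.Str.splitlines inputs).length : Int) by ring,
    pv_ofList_filter]
  rw [pv_upd_fold
      (fun x => x + (List.map (fun column => if column < x then (1:Int) else 0)
        (List.filter (fun c => !(List.map Prod.fst (pvGal (PySem.Str.splitlines inputs))).contains c)
          (PySem.List.pyRange 0 (l.toList.length : Int) 1))).sum * (expansion - 1))
      (fun y => y + (List.map (fun row => if row < y then (1:Int) else 0)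
        (List.filter (fun r => !(List.map Prod.snd (pvGal (PySem.Str.splitlines inputs))).contains r)
          (PySem.List.pyRange 0 ((PySem.Str.splitlines inputs).length : Int) 1))).sum * (expansion - 1))
      (pvGal (PySem.Str.splitlines inputs)).length
      (List.map Prod.fst (pvGal (PySem.Str.splitlines inputs)))
      (List.map Prod.snd (pvGal (PySem.Str.splitlines inputs)))
      (by simp) (by simp)]
  have ht1 : List.take (pvGal (PySem.Str.splitlines inputs)).length
      (List.map Prod.fst (pvGal (PySem.Str.splitlines inputs)))
      = List.map Prod.fst (pvGal (PySem.Str.splitlines inputs)) := by simp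
  have ht2 : List.take (pvGal (PySem.Str.splitlines inputs)).length
      (List.map Prod.snd (pvGal (PySem.Str.splitlines inputs)))
      = List.map Prod.snd (pvGal (PySem.Str.splitlines inputs)) := by simp
  have hd1 : List.drop (pvGal (PySem.Str.splitlines inputs)).length
      (List.map Prod.fst (pvGal (PySem.Str.splitlines inputs))) = [] := by simp
  have hd2 : List.drop (pvGal (PySem.Str.splitlines inputs)).length
      (List.map Prod.snd (pvGal (PySem.Str.splitlines inputs))) = [] := by simp
  simp only [ht1, ht2, hd1, hd2, List.append_nil, pvD_items]
  rw [List.map_map, List.map_map, pv_filter_eq, pv_filter_eq]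
  rw [← pv_map_enum (pvGal (PySem.Str.splitlines inputs)) _ 0,
      ← pv_map_enum (pvGal (PySem.Str.splitlines inputs)) _ 0]
  simp only [Prod.mk.injEq]
  refine ⟨trivial, ?_, ?_⟩
  · apply List.map_congr_left
    intro p _
    simp only [Function.comp_apply, Prod.mk.injEq]
    exact ⟨trivial, by rw [pv_shift_eq]⟩
  · apply List.map_congr_left
    intro p _
    simp only [Function.comp_apply, Prod.mk.injEq]
    exact ⟨trivial, by rw [pv_shift_eq]⟩

-- ===== VERDICT (by name: the statement is the Claim_ definition above) =====
theorem expand_galaxies_spec : Claim_equal_expand_galaxies := by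
  intro inputs expansion _hdom hpre
  unfold Spec_expand_galaxies
  exact pv_main inputs expansion hpre
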